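-- pv_equiv track=rewrite | github.com/achimdehnert/risk-hub | src/substances/services/substance_lookup.py | _h_codes_to_descriptions
-- ===== SOURCE A (Python) =====
-- def _h_codes_to_descriptions(h_codes: set[str]) -> list[str]:
--     """Map H-codes to German descriptions."""
--     H_MAP = {
--         "H200": "Instabil, explosiv",
--         "H201": "Explosiv; Gefahr der Massenexplosion",
--         "H202": "Explosiv; große Gefahr durch Splitter",
--         "H220": "Extrem entzündbares Gas",
--         "H221": "Entzündbares Gas",
--         "H224": "Flüssigkeit und Dampf extrem entzündbar",
--         "H225": "Flüssigkeit und Dampf leicht entzündbar",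
--         "H226": "Flüssigkeit und Dampf entzündbar",
--         "H228": "Entzündbarer Feststoff",
--         "H242": "Erwärmung kann Brand verursachen",
--         "H270": "Kann Brand verursachen oder verstärken; Oxidationsmittel",
--         "H271": "Kann Brand oder Explosion verursachen; starkes Oxidationsmittel",
--         "H272": "Kann Brand verstärken; Oxidationsmittel",
--         "H280": "Enthält Gas unter Druck",
--         "H281": "Enthält tiefgekühltes Gas",
--         "H290": "Kann gegenüber Metallen korrosiv sein",
--         "H300": "Lebensgefahr bei Verschlucken",
--         "H301": "Giftig bei Verschlucken",
--         "H302": "Gesundheitsschädlich bei Verschlucken",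
--         "H304": "Kann bei Verschlucken und Eindringen in die Atemwege tödlich sein",
--         "H310": "Lebensgefahr bei Hautkontakt",
--         "H311": "Giftig bei Hautkontakt",
--         "H312": "Gesundheitsschädlich bei Hautkontakt",
--         "H314": "Verursacht schwere Verätzungen der Haut und schwere Augenschäden",
--         "H315": "Verursacht Hautreizungen",
--         "H317": "Kann allergische Hautreaktionen verursachen",
--         "H318": "Verursacht schwere Augenschäden",
--         "H319": "Verursacht schwere Augenreizung",
--         "H330": "Lebensgefahr bei Einatmen",
--         "H331": "Giftig bei Einatmen",
--         "H332": "Gesundheitsschädlich bei Einatmen",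
--         "H334": "Kann bei Einatmen Allergie oder Asthma auslösen",
--         "H335": "Kann die Atemwege reizen",
--         "H336": "Kann Schläfrigkeit und Benommenheit verursachen",
--         "H340": "Kann genetische Defekte verursachen",
--         "H341": "Kann vermutlich genetische Defekte verursachen",
--         "H350": "Kann Krebs erzeugen",
--         "H351": "Kann vermutlich Krebs erzeugen",
--         "H360": "Kann die Fruchtbarkeit beeinträchtigen oder das Kind im Mutterleib schädigen",
--         "H361": "Kann vermutlich die Fruchtbarkeit beeinträchtigen oder das Kind schädigen",
--         "H362": "Kann Säuglinge über die Muttermilch schädigen",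
--         "H370": "Schädigt die Organe",
--         "H371": "Kann die Organe schädigen",
--         "H372": "Schädigt die Organe bei längerer oder wiederholter Exposition",
--         "H373": "Kann die Organe schädigen bei längerer oder wiederholter Exposition",
--         "H400": "Sehr giftig für Wasserorganismen",
--         "H410": "Sehr giftig für Wasserorganismen mit langfristiger Wirkung",
--         "H411": "Giftig für Wasserorganismen mit langfristiger Wirkung",
--         "H412": "Schädlich für Wasserorganismen mit langfristiger Wirkung",
--         "H413": "Kann für Wasserorganismen schädlich sein mit langfristiger Wirkung",
--         "H420": "Schädigt die öffentliche Gesundheit und die Umwelt durch Ozonabbau",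
--     }
--     descriptions = []
--     for code in sorted(h_codes):
--         desc = H_MAP.get(code, "")
--         if desc:
--             descriptions.append(f"{code}: {desc}")
--     return descriptions
-- ===== SOURCE B (Python) =====
-- # Preformatted output lines, in the (already ascending, equal-length-key) table order.
-- _H_LINES = [
--     "H200: Instabil, explosiv",
--     "H201: Explosiv; Gefahr der Massenexplosion",
--     "H202: Explosiv; große Gefahr durch Splitter",
--     "H220: Extrem entzündbares Gas",
--     "H221: Entzündbares Gas",
--     "H224: Flüssigkeit und Dampf extrem entzündbar",
--     "H225: Flüssigkeit und Dampf leicht entzündbar",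
--     "H226: Flüssigkeit und Dampf entzündbar",
--     "H228: Entzündbarer Feststoff",
--     "H242: Erwärmung kann Brand verursachen",
--     "H270: Kann Brand verursachen oder verstärken; Oxidationsmittel",
--     "H271: Kann Brand oder Explosion verursachen; starkes Oxidationsmittel",
--     "H272: Kann Brand verstärken; Oxidationsmittel",
--     "H280: Enthält Gas unter Druck",
--     "H281: Enthält tiefgekühltes Gas",
--     "H290: Kann gegenüber Metallen korrosiv sein",
--     "H300: Lebensgefahr bei Verschlucken",
--     "H301: Giftig bei Verschlucken",
--     "H302: Gesundheitsschädlich bei Verschlucken",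
--     "H304: Kann bei Verschlucken und Eindringen in die Atemwege tödlich sein",
--     "H310: Lebensgefahr bei Hautkontakt",
--     "H311: Giftig bei Hautkontakt",
--     "H312: Gesundheitsschädlich bei Hautkontakt",
--     "H314: Verursacht schwere Verätzungen der Haut und schwere Augenschäden",
--     "H315: Verursacht Hautreizungen",
--     "H317: Kann allergische Hautreaktionen verursachen",
--     "H318: Verursacht schwere Augenschäden",
--     "H319: Verursacht schwere Augenreizung",
--     "H330: Lebensgefahr bei Einatmen",
--     "H331: Giftig bei Einatmen",
--     "H332: Gesundheitsschädlich bei Einatmen",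
--     "H334: Kann bei Einatmen Allergie oder Asthma auslösen",
--     "H335: Kann die Atemwege reizen",
--     "H336: Kann Schläfrigkeit und Benommenheit verursachen",
--     "H340: Kann genetische Defekte verursachen",
--     "H341: Kann vermutlich genetische Defekte verursachen",
--     "H350: Kann Krebs erzeugen",
--     "H351: Kann vermutlich Krebs erzeugen",
--     "H360: Kann die Fruchtbarkeit beeinträchtigen oder das Kind im Mutterleib schädigen",
--     "H361: Kann vermutlich die Fruchtbarkeit beeinträchtigen oder das Kind schädigen",
--     "H362: Kann Säuglinge über die Muttermilch schädigen",
--     "H370: Schädigt die Organe",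
--     "H371: Kann die Organe schädigen",
--     "H372: Schädigt die Organe bei längerer oder wiederholter Exposition",
--     "H373: Kann die Organe schädigen bei längerer oder wiederholter Exposition",
--     "H400: Sehr giftig für Wasserorganismen",
--     "H410: Sehr giftig für Wasserorganismen mit langfristiger Wirkung",
--     "H411: Giftig für Wasserorganismen mit langfristiger Wirkung",
--     "H412: Schädlich für Wasserorganismen mit langfristiger Wirkung",
--     "H413: Kann für Wasserorganismen schädlich sein mit langfristiger Wirkung",
--     "H420: Schädigt die öffentliche Gesundheit und die Umwelt durch Ozonabbau",
-- ]
--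
--
-- def _h_codes_to_descriptions(h_codes: set[str]) -> list[str]:
--     """Map H-codes to German descriptions."""
--     # Every code is 4 characters ("H" + 3 digits) and the lines are pre-sorted,
--     # so selecting lines whose 4-char prefix is a requested code yields the same
--     # sorted list without sorting the input, without a dict and without
--     # formatting at call time.
--     return [line for line in _H_LINES if line[:4] in h_codes]
-- ===== Notes on version B (the rewrite author's own statement) =====
-- stated objective: faster
-- what changed: B drops the sort, the dict and the call-time formatting: it filters a fixed list of preformatted 'code: description' lines (pre-sorted, equal-length 4-char keys) by whether each line's 4-char prefix is in the input set, yielding the same sorted output.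
import Mathlib
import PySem

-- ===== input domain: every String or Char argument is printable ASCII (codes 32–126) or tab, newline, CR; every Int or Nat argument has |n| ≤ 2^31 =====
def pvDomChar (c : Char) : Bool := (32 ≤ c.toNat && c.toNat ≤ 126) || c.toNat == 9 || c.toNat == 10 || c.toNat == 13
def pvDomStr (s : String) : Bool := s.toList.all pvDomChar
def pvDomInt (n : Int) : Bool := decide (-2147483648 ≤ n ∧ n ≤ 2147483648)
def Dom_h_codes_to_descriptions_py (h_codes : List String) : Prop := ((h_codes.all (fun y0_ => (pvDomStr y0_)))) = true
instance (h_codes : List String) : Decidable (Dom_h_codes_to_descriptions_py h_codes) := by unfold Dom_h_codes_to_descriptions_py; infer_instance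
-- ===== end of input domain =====

-- B replaces "sort the input, then format each dict hit" by selecting from a fixed list of
-- PREFORMATTED "code: description" lines those whose 4-character prefix is a requested code
-- (the lines are pre-sorted with equal-length keys, so no sort of the input is needed).
set_option maxRecDepth 40000
set_option maxHeartbeats 2000000


-- ===== PORT A =====
-- A's H_MAP dict literal (pairs in program order).
def pvHItems : List (String × String) := [
  ("H200", "Instabil, explosiv"),
  ("H201", "Explosiv; Gefahr der Massenexplosion"),
  ("H202", "Explosiv; große Gefahr durch Splitter"),
  ("H220", "Extrem entzündbares Gas"),
  ("H221", "Entzündbares Gas"),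
  ("H224", "Flüssigkeit und Dampf extrem entzündbar"),
  ("H225", "Flüssigkeit und Dampf leicht entzündbar"),
  ("H226", "Flüssigkeit und Dampf entzündbar"),
  ("H228", "Entzündbarer Feststoff"),
  ("H242", "Erwärmung kann Brand verursachen"),
  ("H270", "Kann Brand verursachen oder verstärken; Oxidationsmittel"),
  ("H271", "Kann Brand oder Explosion verursachen; starkes Oxidationsmittel"),
  ("H272", "Kann Brand verstärken; Oxidationsmittel"),
  ("H280", "Enthält Gas unter Druck"),
  ("H281", "Enthält tiefgekühltes Gas"),
  ("H290", "Kann gegenüber Metallen korrosiv sein"),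
  ("H300", "Lebensgefahr bei Verschlucken"),
  ("H301", "Giftig bei Verschlucken"),
  ("H302", "Gesundheitsschädlich bei Verschlucken"),
  ("H304", "Kann bei Verschlucken und Eindringen in die Atemwege tödlich sein"),
  ("H310", "Lebensgefahr bei Hautkontakt"),
  ("H311", "Giftig bei Hautkontakt"),
  ("H312", "Gesundheitsschädlich bei Hautkontakt"),
  ("H314", "Verursacht schwere Verätzungen der Haut und schwere Augenschäden"),
  ("H315", "Verursacht Hautreizungen"),
  ("H317", "Kann allergische Hautreaktionen verursachen"),
  ("H318", "Verursacht schwere Augenschäden"),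
  ("H319", "Verursacht schwere Augenreizung"),
  ("H330", "Lebensgefahr bei Einatmen"),
  ("H331", "Giftig bei Einatmen"),
  ("H332", "Gesundheitsschädlich bei Einatmen"),
  ("H334", "Kann bei Einatmen Allergie oder Asthma auslösen"),
  ("H335", "Kann die Atemwege reizen"),
  ("H336", "Kann Schläfrigkeit und Benommenheit verursachen"),
  ("H340", "Kann genetische Defekte verursachen"),
  ("H341", "Kann vermutlich genetische Defekte verursachen"),
  ("H350", "Kann Krebs erzeugen"),
  ("H351", "Kann vermutlich Krebs erzeugen"),
  ("H360", "Kann die Fruchtbarkeit beeinträchtigen oder das Kind im Mutterleib schädigen"),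
  ("H361", "Kann vermutlich die Fruchtbarkeit beeinträchtigen oder das Kind schädigen"),
  ("H362", "Kann Säuglinge über die Muttermilch schädigen"),
  ("H370", "Schädigt die Organe"),
  ("H371", "Kann die Organe schädigen"),
  ("H372", "Schädigt die Organe bei längerer oder wiederholter Exposition"),
  ("H373", "Kann die Organe schädigen bei längerer oder wiederholter Exposition"),
  ("H400", "Sehr giftig für Wasserorganismen"),
  ("H410", "Sehr giftig für Wasserorganismen mit langfristiger Wirkung"),
  ("H411", "Giftig für Wasserorganismen mit langfristiger Wirkung"),
  ("H412", "Schädlich für Wasserorganismen mit langfristiger Wirkung"),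
  ("H413", "Kann für Wasserorganismen schädlich sein mit langfristiger Wirkung"),
  ("H420", "Schädigt die öffentliche Gesundheit und die Umwelt durch Ozonabbau")
]

def pvHMap : PySem.Dict String String := PySem.Dict.mk pvHItems

def h_codes_to_descriptions_py (h_codes : List String) : List String :=
  (PySem.List.sorted h_codes (fun x => x) false).foldl
    (fun descriptions code =>
      let desc := PySem.Dict.getD pvHMap code ""
      if desc ≠ "" then descriptions ++ [code ++ ": " ++ desc] else descriptions)
    []

-- ===== PORT B =====
-- Source B's _H_LINES literal: the preformatted output lines.
def pvHLines : List String := [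
  "H200: Instabil, explosiv",
  "H201: Explosiv; Gefahr der Massenexplosion",
  "H202: Explosiv; große Gefahr durch Splitter",
  "H220: Extrem entzündbares Gas",
  "H221: Entzündbares Gas",
  "H224: Flüssigkeit und Dampf extrem entzündbar",
  "H225: Flüssigkeit und Dampf leicht entzündbar",
  "H226: Flüssigkeit und Dampf entzündbar",
  "H228: Entzündbarer Feststoff",
  "H242: Erwärmung kann Brand verursachen",
  "H270: Kann Brand verursachen oder verstärken; Oxidationsmittel",
  "H271: Kann Brand oder Explosion verursachen; starkes Oxidationsmittel",
  "H272: Kann Brand verstärken; Oxidationsmittel",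
  "H280: Enthält Gas unter Druck",
  "H281: Enthält tiefgekühltes Gas",
  "H290: Kann gegenüber Metallen korrosiv sein",
  "H300: Lebensgefahr bei Verschlucken",
  "H301: Giftig bei Verschlucken",
  "H302: Gesundheitsschädlich bei Verschlucken",
  "H304: Kann bei Verschlucken und Eindringen in die Atemwege tödlich sein",
  "H310: Lebensgefahr bei Hautkontakt",
  "H311: Giftig bei Hautkontakt",
  "H312: Gesundheitsschädlich bei Hautkontakt",
  "H314: Verursacht schwere Verätzungen der Haut und schwere Augenschäden",
  "H315: Verursacht Hautreizungen",
  "H317: Kann allergische Hautreaktionen verursachen",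
  "H318: Verursacht schwere Augenschäden",
  "H319: Verursacht schwere Augenreizung",
  "H330: Lebensgefahr bei Einatmen",
  "H331: Giftig bei Einatmen",
  "H332: Gesundheitsschädlich bei Einatmen",
  "H334: Kann bei Einatmen Allergie oder Asthma auslösen",
  "H335: Kann die Atemwege reizen",
  "H336: Kann Schläfrigkeit und Benommenheit verursachen",
  "H340: Kann genetische Defekte verursachen",
  "H341: Kann vermutlich genetische Defekte verursachen",
  "H350: Kann Krebs erzeugen",
  "H351: Kann vermutlich Krebs erzeugen",
  "H360: Kann die Fruchtbarkeit beeinträchtigen oder das Kind im Mutterleib schädigen",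
  "H361: Kann vermutlich die Fruchtbarkeit beeinträchtigen oder das Kind schädigen",
  "H362: Kann Säuglinge über die Muttermilch schädigen",
  "H370: Schädigt die Organe",
  "H371: Kann die Organe schädigen",
  "H372: Schädigt die Organe bei längerer oder wiederholter Exposition",
  "H373: Kann die Organe schädigen bei längerer oder wiederholter Exposition",
  "H400: Sehr giftig für Wasserorganismen",
  "H410: Sehr giftig für Wasserorganismen mit langfristiger Wirkung",
  "H411: Giftig für Wasserorganismen mit langfristiger Wirkung",
  "H412: Schädlich für Wasserorganismen mit langfristiger Wirkung",
  "H413: Kann für Wasserorganismen schädlich sein mit langfristiger Wirkung",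
  "H420: Schädigt die öffentliche Gesundheit und die Umwelt durch Ozonabbau"
]

def h_codes_to_descriptions_py_alt (h_codes : List String) : List String :=
  pvHLines.filter (fun line => h_codes.contains (PySem.Str.slice line none (some 4)))

-- ===== PRECONDITION & SPEC =====
-- Pre_ is only the representation invariant of the Python argument: h_codes is a set[str], so its
-- List String encoding holds distinct elements; it excludes no input the Python A accepts.
def Pre_h_codes_to_descriptions_py (h_codes : List String) : Prop := h_codes.Nodup
instance (h_codes : List String) : Decidable (Pre_h_codes_to_descriptions_py h_codes) := by unfold Pre_h_codes_to_descriptions_py; infer_instance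

def pvWitness_h_codes_to_descriptions_py : List String := ["H301", "H200", "H999"]

def Spec_h_codes_to_descriptions_py (h_codes : List String) (out : List String) : Prop := out = h_codes_to_descriptions_py_alt h_codes
instance (h_codes : List String) (out : List String) : Decidable (Spec_h_codes_to_descriptions_py h_codes out) := by unfold Spec_h_codes_to_descriptions_py; infer_instance

-- ===== CLAIM (what is proved, stated in full; the proofs are below) =====
def Claim_equal_h_codes_to_descriptions_py : Prop := ∀ (h_codes : List String), Dom_h_codes_to_descriptions_py h_codes → Pre_h_codes_to_descriptions_py h_codes → Spec_h_codes_to_descriptions_py h_codes (h_codes_to_descriptions_py h_codes)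

-- ===== LEMMAS AND PROOFS =====

-- the table's keys, in table order
def pvKeys : List String := pvHItems.map (fun p => p.1)

lemma pvKeys_lt : List.Pairwise (· < ·) pvKeys := by
  have h : List.Pairwise (fun a b : String => a.toList < b.toList) pvKeys := by decide
  exact h.imp (fun hab => String.lt_iff_toList_lt.mpr hab)

lemma pvKeys_nodup : pvKeys.Nodup := pvKeys_lt.imp ne_of_lt

lemma pvTable_lookup : ∀ p ∈ pvHItems, PySem.Dict.getD pvHMap p.1 "" = p.2 ∧ p.2 ≠ "" := by decide

-- Source B's line list is exactly the formatted table, and each line's 4-char prefix is its key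
lemma pvLines_eq : pvHLines = pvHItems.map (fun p => p.1 ++ ": " ++ p.2) := by decide

lemma pvSlice_key : ∀ p ∈ pvHItems,
    PySem.Str.slice (p.1 ++ ": " ++ p.2) none (some 4) = p.1 := by decide

lemma pvLookup_not_mem {c : String} (h : c ∉ pvKeys) : PySem.Dict.getD pvHMap c "" = "" := by
  apply PySem.Dict.getD_of_not_contains
  rw [Bool.eq_false_iff]
  intro hc
  exact h ((PySem.Dict.contains_iff_mem_keys pvHMap c).mp hc)

lemma pvPred_iff (c : String) : PySem.Dict.getD pvHMap c "" ≠ "" ↔ c ∈ pvKeys := by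
  constructor
  · intro h
    by_contra hc
    exact h (pvLookup_not_mem hc)
  · intro h
    obtain ⟨p, hp, hpc⟩ := List.mem_map.mp h
    obtain ⟨h1, h2⟩ := pvTable_lookup p hp
    rw [← hpc]; rw [h1]; exact h2

-- the filtered sorted input equals the filtered table-key list
lemma pvKeyFilter (h_codes : List String) (hnd : h_codes.Nodup) :
    (PySem.List.sorted h_codes (fun x => x) false).filter (fun c => decide (c ∈ pvKeys))
      = pvKeys.filter (fun c => h_codes.contains c) := by
  have hperm : (PySem.List.sorted h_codes (fun x => x) false).Perm h_codes :=
    PySem.List.sorted_perm h_codes (fun x => x) false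
  have hnd1 : ((PySem.List.sorted h_codes (fun x => x) false).filter (fun c => decide (c ∈ pvKeys))).Nodup :=
    (hperm.nodup_iff.mpr hnd).filter _
  have hnd2 : (pvKeys.filter (fun c => h_codes.contains c)).Nodup := pvKeys_nodup.filter _
  have hmem : ∀ a, a ∈ (PySem.List.sorted h_codes (fun x => x) false).filter (fun c => decide (c ∈ pvKeys))
      ↔ a ∈ pvKeys.filter (fun c => h_codes.contains c) := by
    intro a
    simp only [List.mem_filter, decide_eq_true_eq, List.contains_iff_mem]
    rw [hperm.mem_iff]
    tauto
  have hp : (PySem.List.sorted h_codes (fun x => x) false).filter (fun c => decide (c ∈ pvKeys))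
      |>.Perm (pvKeys.filter (fun c => h_codes.contains c)) :=
    (List.perm_ext_iff_of_nodup hnd1 hnd2).mpr hmem
  have hs1 : ((PySem.List.sorted h_codes (fun x => x) false).filter (fun c => decide (c ∈ pvKeys))).Pairwise (· < ·) := by
    have hle : (PySem.List.sorted h_codes (fun x => x) false).Pairwise (· ≤ ·) :=
      PySem.List.sorted_pairwise h_codes (fun x => x)
    have hne : (PySem.List.sorted h_codes (fun x => x) false).Pairwise (· ≠ ·) :=
      hperm.nodup_iff.mpr hnd
    exact ((hle.and hne).imp (fun h => lt_of_le_of_ne h.1 h.2)).filter _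
  have hs2 : (pvKeys.filter (fun c => h_codes.contains c)).Pairwise (· < ·) := pvKeys_lt.filter _
  exact List.Perm.eq_of_pairwise
    (fun a b _ _ hab hba => absurd hba (lt_asymm hab)) hs1 hs2 hp

-- A's result, reduced to a map over the filtered table
lemma pvA_eq (h_codes : List String) (hnd : h_codes.Nodup) :
    h_codes_to_descriptions_py h_codes
      = (pvHItems.filter (fun p => h_codes.contains p.1)).map
          (fun p => p.1 ++ ": " ++ p.2) := by
  unfold h_codes_to_descriptions_py
  rw [PySem.List.foldl_append_ite (fun c => PySem.Dict.getD pvHMap c "" ≠ "")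
        (fun c => c ++ ": " ++ PySem.Dict.getD pvHMap c "")]
  rw [List.nil_append]
  rw [List.filter_congr (fun c _ =>
        decide_eq_decide.mpr (pvPred_iff c))]
  rw [pvKeyFilter h_codes hnd]
  unfold pvKeys
  rw [List.filter_map, List.map_map]
  apply List.map_congr_left
  intro p hp
  have hpd := (pvTable_lookup p (List.mem_of_mem_filter hp)).1
  show p.1 ++ ": " ++ PySem.Dict.getD pvHMap p.1 "" = p.1 ++ ": " ++ p.2
  rw [hpd]

-- ===== VERDICT (by name: the statement is the Claim_ definition above) =====
theorem h_codes_to_descriptions_py_spec : Claim_equal_h_codes_to_descriptions_py := by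
  intro h_codes _ hnd
  unfold Spec_h_codes_to_descriptions_py
  rw [pvA_eq h_codes hnd]
  unfold h_codes_to_descriptions_py_alt
  rw [pvLines_eq, List.filter_map]
  symm
  exact congrArg (List.map _) (List.filter_congr (fun p hp => by
    show h_codes.contains (PySem.Str.slice (p.1 ++ ": " ++ p.2) none (some 4)) = h_codes.contains p.1
    rw [pvSlice_key p hp]))
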